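-- pv_equiv track=rewrite | github.com/Subasri23Hub/inkforge | src/ui_components.py | render_book_export
-- ===== SOURCE A (Python) =====
-- def render_book_export(story_blocks, book_indices, title):
--     if not book_indices: return ""
--     lines = [title.upper(), "="*len(title), ""]
--     cur_ch = None
--     for idx in sorted(book_indices):
--         if idx < len(story_blocks):
--             b = story_blocks[idx]
--             ch = b.get("chapter_at_time", 1)
--             if ch != cur_ch:
--                 cur_ch = ch
--                 lines.append(f"\n\nCHAPTER {ch}\n{'─'*40}\n")
--             lines.append(b["content"] + "\n")
--     return "\n".join(lines)
-- ===== SOURCE B (Python) =====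
-- def render_book_export(story_blocks, book_indices, title):
--     if not book_indices:
--         return ""
--     blocks = [story_blocks[i] for i in sorted(book_indices) if i < len(story_blocks)]
--     parts = [title.upper(), "=" * len(title), ""]
--     i, n = 0, len(blocks)
--     while i < n:
--         ch = blocks[i].get("chapter_at_time", 1)
--         parts.append(f"\n\nCHAPTER {ch}\n{'─'*40}\n")
--         j = i
--         while j < n and blocks[j].get("chapter_at_time", 1) == ch:
--             parts.append(blocks[j]["content"] + "\n")
--             j += 1
--         i = j
--     return "\n".join(parts)
-- ===== Notes on version B (the rewrite author's own statement) =====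
-- stated objective: alternative
-- what changed: B first materialises the filtered, sorted list of selected blocks, then renders it run by run with a two-pointer scan (outer loop emits one chapter header per run, inner loop emits that run's content lines), replacing A's single pass that threads a cur_ch state variable.
import Mathlib
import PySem

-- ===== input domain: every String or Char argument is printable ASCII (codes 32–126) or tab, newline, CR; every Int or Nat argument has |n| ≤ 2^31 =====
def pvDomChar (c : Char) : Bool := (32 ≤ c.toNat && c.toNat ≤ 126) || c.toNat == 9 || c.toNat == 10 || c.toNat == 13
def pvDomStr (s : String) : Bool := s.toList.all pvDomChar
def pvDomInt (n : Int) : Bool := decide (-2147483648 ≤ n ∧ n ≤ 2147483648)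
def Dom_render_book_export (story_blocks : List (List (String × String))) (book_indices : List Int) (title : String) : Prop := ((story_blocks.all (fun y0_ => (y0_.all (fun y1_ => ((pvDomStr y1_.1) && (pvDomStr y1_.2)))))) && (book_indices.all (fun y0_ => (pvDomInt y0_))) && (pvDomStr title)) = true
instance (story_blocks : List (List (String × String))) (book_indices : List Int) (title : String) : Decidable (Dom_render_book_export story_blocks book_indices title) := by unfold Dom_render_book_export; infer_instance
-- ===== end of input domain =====

-- B is an alternative decomposition: filter+fetch the selected blocks once, then render them
-- run by run (outer loop per chapter run, inner run scan), instead of A's single pass with a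
-- cur_ch state variable. Same complexity; return values proved equal on Pre_.

-- ===== PORT A =====
-- chapter value as Python sees it: some s if the key is present, none = the int default 1
-- (kept as an Option so that Python's 1 != "1" distinction survives the port)
def pvAKey (b : List (String × String)) : Option String :=
  PySem.Dict.get? (PySem.Dict.mk b) "chapter_at_time"

-- f"\n\nCHAPTER {ch}\n{'─'*40}\n"  (ch prints as "1" when it is the int default)
def pvAHeader (ch : Option String) : List Char :=
  "\n\nCHAPTER ".toList ++ (ch.getD "1").toList ++ '\n' :: List.replicate 40 '─' ++ ['\n']

-- b["content"] + "\n"; Pre_ guarantees the key is present, so getD "" is never the raising case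
def pvAContent (b : List (String × String)) : List Char :=
  ((PySem.Dict.get? (PySem.Dict.mk b) "content").getD "").toList ++ ['\n']

def render_book_export (story_blocks : List (List (String × String))) (book_indices : List Int) (title : String) : String :=
  if book_indices.isEmpty then "" else
  let lines0 : List (List Char) :=
    [(PySem.Str.upper title).toList, List.replicate title.toList.length '=', []]
  let r := (PySem.List.sorted book_indices (fun x => x) false).foldl
    (fun (st : List (List Char) × Option (Option String)) idx =>
      if idx < (story_blocks.length : Int) then
        let b := (PySem.List.pyGet? story_blocks idx).getD []
        let ch := pvAKey b
        let st2 := if some ch ≠ st.2 then (st.1 ++ [pvAHeader ch], some ch) else st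
        (st2.1 ++ [pvAContent b], st2.2)
      else st) (lines0, none)
  String.ofList (PySem.Chars.join ['\n'] r.1)

-- ===== PORT B =====
def pvBKey (b : List (String × String)) : Option String :=
  PySem.Dict.get? (PySem.Dict.mk b) "chapter_at_time"

def pvBHeader (ch : Option String) : List Char :=
  "\n\nCHAPTER ".toList ++ (ch.getD "1").toList ++ '\n' :: List.replicate 40 '─' ++ ['\n']

def pvBContent (b : List (String × String)) : List Char :=
  ((PySem.Dict.get? (PySem.Dict.mk b) "content").getD "").toList ++ ['\n']

-- blocks = [story_blocks[i] for i in sorted(book_indices) if i < len(story_blocks)]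
def pvBBlocks (story_blocks : List (List (String × String))) (book_indices : List Int) : List (List (String × String)) :=
  (((PySem.List.sorted book_indices (fun x => x) false).filter
      (fun i => decide (i < (story_blocks.length : Int)))).map
    (fun i => (PySem.List.pyGet? story_blocks i).getD []))

-- the run-scanning while loops: one header per run, then the run's content lines
def pvBRender : List (List (String × String)) → List (List Char)
  | [] => []
  | b :: bs =>
    let ch := pvBKey b
    pvBHeader ch :: pvBContent b ::
      ((bs.takeWhile (fun b' => pvBKey b' == ch)).map pvBContent
        ++ pvBRender (bs.dropWhile (fun b' => pvBKey b' == ch)))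
termination_by l => l.length
decreasing_by
  exact Nat.lt_succ_of_le (List.length_dropWhile_le _ _)

def render_book_export_alt (story_blocks : List (List (String × String))) (book_indices : List Int) (title : String) : String :=
  if book_indices.isEmpty then "" else
  String.ofList (PySem.Chars.join ['\n']
    ([(PySem.Str.upper title).toList, List.replicate title.toList.length '=', []]
      ++ pvBRender (pvBBlocks story_blocks book_indices)))

-- ===== PRECONDITION & SPEC =====
-- Pre_ excludes exactly the inputs where the Python raises: a selected index below
-- -len(story_blocks) (IndexError) or a selected block without a "content" key (KeyError).
def Pre_render_book_export (story_blocks : List (List (String × String))) (book_indices : List Int) (title : String) : Prop :=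
  ∀ idx ∈ book_indices, idx < (story_blocks.length : Int) →
    (PySem.List.pyGet? story_blocks idx).isSome = true ∧
    (PySem.Dict.get? (PySem.Dict.mk ((PySem.List.pyGet? story_blocks idx).getD [])) "content").isSome = true

instance (story_blocks : List (List (String × String))) (book_indices : List Int) (title : String) : Decidable (Pre_render_book_export story_blocks book_indices title) := by unfold Pre_render_book_export; infer_instance

def pvWitness_render_book_export : (List (List (String × String))) × List Int × String :=
  ([[("content", "hello"), ("chapter_at_time", "2")], [("content", "world")]], [1, 0], "My Book")

def Spec_render_book_export (story_blocks : List (List (String × String))) (book_indices : List Int) (title : String) (out : String) : Prop := out = render_book_export_alt story_blocks book_indices title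
instance (story_blocks : List (List (String × String))) (book_indices : List Int) (title : String) (out : String) : Decidable (Spec_render_book_export story_blocks book_indices title out) := by unfold Spec_render_book_export; infer_instance

-- ===== CLAIM (what is proved, stated in full; the proofs are below) =====
def Claim_equal_render_book_export : Prop := ∀ (story_blocks : List (List (String × String))) (book_indices : List Int) (title : String), Dom_render_book_export story_blocks book_indices title → Pre_render_book_export story_blocks book_indices title → Spec_render_book_export story_blocks book_indices title (render_book_export story_blocks book_indices title)

-- ===== LEMMAS AND PROOFS =====

theorem pvWitness_ok :
    Dom_render_book_export (pvWitness_render_book_export.1) (pvWitness_render_book_export.2.1) (pvWitness_render_book_export.2.2) ∧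
    Pre_render_book_export (pvWitness_render_book_export.1) (pvWitness_render_book_export.2.1) (pvWitness_render_book_export.2.2) := by
  decide

-- A's cur_ch state machine, written as structural recursion over the block list
def pvEmitA (cur : Option (Option String)) : List (List (String × String)) → List (List Char)
  | [] => []
  | b :: bs =>
    let ch := pvAKey b
    if some ch ≠ cur then pvAHeader ch :: pvAContent b :: pvEmitA (some ch) bs
    else pvAContent b :: pvEmitA cur bs

-- B's helpers are definitionally A's
theorem pvKey_eq : pvBKey = pvAKey := rfl
theorem pvHeader_eq : pvBHeader = pvAHeader := rfl
theorem pvContent_eq : pvBContent = pvAContent := rfl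

theorem pvBRender_cons (b : List (String × String)) (bs : List (List (String × String))) :
    pvBRender (b :: bs) =
      pvAHeader (pvAKey b) :: pvAContent b ::
        ((bs.takeWhile (fun b' => pvAKey b' == pvAKey b)).map pvAContent
          ++ pvBRender (bs.dropWhile (fun b' => pvAKey b' == pvAKey b))) := by
  rw [pvBRender, pvKey_eq, pvHeader_eq, pvContent_eq]

-- A's fold equals the recursion, with the accumulated lines split off
theorem pvFoldA_eq (bs : List (List (String × String))) :
    ∀ (L : List (List Char)) (c : Option (Option String)),
      (bs.foldl (fun (st : List (List Char) × Option (Option String)) b =>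
        let ch := pvAKey b
        let st2 := if some ch ≠ st.2 then (st.1 ++ [pvAHeader ch], some ch) else st
        (st2.1 ++ [pvAContent b], st2.2)) (L, c)).1 = L ++ pvEmitA c bs := by
  induction bs with
  | nil => intro L c; simp [pvEmitA]
  | cons b bs ih =>
    intro L c
    rw [List.foldl_cons]
    by_cases h : some (pvAKey b) = c
    · rw [show (let ch := pvAKey b
          let st2 := if some ch ≠ (L, c).2 then ((L, c).1 ++ [pvAHeader ch], some ch) else (L, c)
          (st2.1 ++ [pvAContent b], st2.2)) = (L ++ [pvAContent b], c) from by simp [h]]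
      rw [ih]
      simp [pvEmitA, h]
    · rw [show (let ch := pvAKey b
          let st2 := if some ch ≠ (L, c).2 then ((L, c).1 ++ [pvAHeader ch], some ch) else (L, c)
          (st2.1 ++ [pvAContent b], st2.2))
          = (L ++ [pvAHeader (pvAKey b), pvAContent b], some (pvAKey b)) from by simp [h]]
      rw [ih]
      simp [pvEmitA, h]

-- a run of equal keys renders as its content lines, then B takes over at the key change
theorem pvEmitA_some (bs : List (List (String × String))) :
    ∀ ch : Option String,
      pvEmitA (some ch) bs =
        (bs.takeWhile (fun b' => pvAKey b' == ch)).map pvAContent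
          ++ pvBRender (bs.dropWhile (fun b' => pvAKey b' == ch)) := by
  induction bs with
  | nil => intro ch; simp [pvEmitA, pvBRender]
  | cons b bs ih =>
    intro ch
    by_cases h : pvAKey b = ch
    · have hb : (pvAKey b == ch) = true := by simp [h]
      simp only [pvEmitA, List.takeWhile_cons, List.dropWhile_cons, h]
      simp only [ne_eq, not_true_eq_false, if_false]
      rw [ih ch]
      simp
    · have hb : (pvAKey b == ch) = false := by simp [h]
      simp only [pvEmitA, List.takeWhile_cons, List.dropWhile_cons, hb]
      simp only [Bool.false_eq_true, if_false, List.map_nil, List.nil_append]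
      rw [if_pos (by simp [h]), ih (pvAKey b), pvBRender_cons]

theorem pvEmitA_none (bs : List (List (String × String))) :
    pvEmitA none bs = pvBRender bs := by
  cases bs with
  | nil => simp [pvEmitA, pvBRender]
  | cons b bs =>
    simp only [pvEmitA, ne_eq, reduceCtorEq, not_false_eq_true, if_pos]
    rw [pvEmitA_some bs (pvAKey b), pvBRender_cons]

-- ===== VERDICT (by name: the statement is the Claim_ definition above) =====
theorem render_book_export_spec : Claim_equal_render_book_export := by
  intro story_blocks book_indices title _hDom _hPre
  unfold Spec_render_book_export render_book_export render_book_export_alt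
  by_cases hbi : book_indices.isEmpty
  · simp [hbi]
  · simp only [hbi, Bool.false_eq_true, if_false]
    rw [PySem.List.foldl_ite_eq_foldl_filter
          (p := fun idx => idx < (story_blocks.length : Int))
          (f := fun (st : List (List Char) × Option (Option String)) idx =>
            let b := (PySem.List.pyGet? story_blocks idx).getD []
            let ch := pvAKey b
            let st2 := if some ch ≠ st.2 then (st.1 ++ [pvAHeader ch], some ch) else st
            (st2.1 ++ [pvAContent b], st2.2))]
    rw [show (List.filter (fun x => decide (x < (story_blocks.length : Int)))
          (PySem.List.sorted book_indices (fun x => x) false)).foldl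
          (fun (st : List (List Char) × Option (Option String)) idx =>
            let b := (PySem.List.pyGet? story_blocks idx).getD []
            let ch := pvAKey b
            let st2 := if some ch ≠ st.2 then (st.1 ++ [pvAHeader ch], some ch) else st
            (st2.1 ++ [pvAContent b], st2.2))
          ([(PySem.Str.upper title).toList, List.replicate title.toList.length '=', []], none)
        = (pvBBlocks story_blocks book_indices).foldl
          (fun (st : List (List Char) × Option (Option String)) b =>
            let ch := pvAKey b
            let st2 := if some ch ≠ st.2 then (st.1 ++ [pvAHeader ch], some ch) else st
            (st2.1 ++ [pvAContent b], st2.2))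
          ([(PySem.Str.upper title).toList, List.replicate title.toList.length '=', []], none)
        from by rw [pvBBlocks, List.foldl_map]]
    rw [pvFoldA_eq, pvEmitA_none]
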